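-- pv_equiv track=rewrite | github.com/PraiseOgwuche/sf-restaurant-expert-system | app.py | modify_kb
-- ===== SOURCE A (Python) =====
-- def modify_kb(kb_content):
--     """
--     Modify KB to replace interactive questioning with direct fact checking
--     This avoids the read_menu_py and read_py calls entirely
--     """
--     modified_kb = []
--     skip_next = False
--
--     for line in kb_content.split('\n'):
--         # Skip the definition of interactive menuask and ask clauses
--         if "menuask(A, V, Menu):-" in line or "ask(A, V):-" in line:
--             skip_next = True
--             continue
--
--         if skip_next:
--             if line.strip().endswith("."):
--                 skip_next = False
--             continue
--
--         modified_kb.append(line)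
--
--     # Add simplified versions that just check facts without interaction
--     modified_kb.append("""
-- % Simplified menuask that just checks if the fact is known
-- menuask(_, V, _) :- known(yes, _, V).
--
-- % Simplified ask that just checks if the fact is known
-- ask(_, V) :- known(yes, _, V).
--     """)
--
--     return '\n'.join(modified_kb)
-- ===== SOURCE B (Python) =====
-- TAIL = """
-- % Simplified menuask that just checks if the fact is known
-- menuask(_, V, _) :- known(yes, _, V).
--
-- % Simplified ask that just checks if the fact is known
-- ask(_, V) :- known(yes, _, V).
--     """
--
--
-- def _is_marker(line):
--     return "menuask(A, V, Menu):-" in line or "ask(A, V):-" in line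
--
--
-- def modify_kb(kb_content):
--     lines = kb_content.split('\n')
--     n = len(lines)
--     out = []
--     i = 0
--     while i < n:
--         line = lines[i]
--         if _is_marker(line):
--             i += 1
--             # skip the clause body up to (and including) its terminator line,
--             # where a marker line never counts as a terminator
--             while i < n and (_is_marker(lines[i]) or not lines[i].strip().endswith(".")):
--                 i += 1
--             i += 1  # skip the terminator itself (no-op past end)
--         else:
--             out.append(line)
--             i += 1
--     out.append(TAIL)
--     return '\n'.join(out)
-- ===== Notes on version B (the rewrite author's own statement) =====
-- stated objective: alternative
-- what changed: Replaces the cross-iteration skip_next flag with an index-based while loop that, on seeing a marker line, skips the whole clause (body lines then the terminator line) in an inner loop before resuming.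
import Mathlib
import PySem

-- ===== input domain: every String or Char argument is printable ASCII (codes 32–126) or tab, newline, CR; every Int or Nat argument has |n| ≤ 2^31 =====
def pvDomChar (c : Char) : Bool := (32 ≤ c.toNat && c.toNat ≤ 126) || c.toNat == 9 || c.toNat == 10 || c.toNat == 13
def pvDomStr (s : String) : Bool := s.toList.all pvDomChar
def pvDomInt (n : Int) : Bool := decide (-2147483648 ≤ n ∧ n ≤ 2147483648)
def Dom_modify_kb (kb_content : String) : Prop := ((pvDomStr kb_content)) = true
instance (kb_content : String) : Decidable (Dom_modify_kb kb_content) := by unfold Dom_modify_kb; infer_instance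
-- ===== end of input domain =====

-- B replaces A's cross-iteration skip_next flag with an index-based while loop that
-- skips a whole clause (body + terminator line) in an inner loop; same decomposition change, same cost.

-- shared by both Pythons: the marker test, the terminator test, and the appended literal block
def pvMarker (line : String) : Bool :=
  PySem.Str.isIn "menuask(A, V, Menu):-" line || PySem.Str.isIn "ask(A, V):-" line

def pvTerm (line : String) : Bool :=
  PySem.Str.endswith (PySem.Str.strip line) "."

def pvTail : String :=
  "\n% Simplified menuask that just checks if the fact is known\nmenuask(_, V, _) :- known(yes, _, V).\n\n% Simplified ask that just checks if the fact is known\nask(_, V) :- known(yes, _, V).\n    "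

-- ===== PORT A =====
-- A's loop body: state = (modified_kb, skip_next)
def pvStepA (st : List String × Bool) (line : String) : List String × Bool :=
  if pvMarker line then (st.1, true)
  else if st.2 then (st.1, !pvTerm line)
  else (st.1 ++ [line], false)

def modify_kb (kb_content : String) : String :=
  PySem.Str.join "\n"
    ((((PySem.Str.split? kb_content "\n").getD []).foldl pvStepA ([], false)).1 ++ [pvTail])

-- ===== PORT B =====
-- B's inner while loop: advance past clause-body lines, then past the terminator line
def pvDropClause : List String → List String
  | [] => []
  | l :: rest => if pvMarker l || !pvTerm l then pvDropClause rest else rest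

theorem pvDropClause_length_le : ∀ xs : List String, (pvDropClause xs).length ≤ xs.length
  | [] => Nat.le_refl _
  | l :: rest => by
      simp only [pvDropClause]
      split
      · exact Nat.le_succ_of_le (pvDropClause_length_le rest)
      · exact Nat.le_succ _

-- B's outer while loop over the line index, as recursion on the suffix of lines
def pvGoB : List String → List String
  | [] => []
  | l :: rest =>
      if pvMarker l then pvGoB (pvDropClause rest) else l :: pvGoB rest
termination_by xs => xs.length
decreasing_by
  · exact Nat.lt_succ_of_le (pvDropClause_length_le rest)
  · exact Nat.lt_succ_self _

def modify_kb_alt (kb_content : String) : String :=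
  PySem.Str.join "\n" (pvGoB ((PySem.Str.split? kb_content "\n").getD []) ++ [pvTail])

-- ===== PRECONDITION & SPEC =====
def Spec_modify_kb (kb_content : String) (out : String) : Prop := out = modify_kb_alt kb_content
instance (kb_content : String) (out : String) : Decidable (Spec_modify_kb kb_content out) := by unfold Spec_modify_kb; infer_instance

-- ===== CLAIM (what is proved, stated in full; the proofs are below) =====
def Claim_equal_modify_kb : Prop := ∀ (kb_content : String), Dom_modify_kb kb_content → Spec_modify_kb kb_content (modify_kb kb_content)

-- ===== LEMMAS AND PROOFS =====

-- invariant relating A's fold (in both skip states) to B's clause-skipping recursion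
theorem pvFoldA_eq : ∀ (lines : List String) (acc : List String),
    (lines.foldl pvStepA (acc, false)).1 = acc ++ pvGoB lines ∧
    (lines.foldl pvStepA (acc, true)).1 = acc ++ pvGoB (pvDropClause lines)
  | [], acc => by simp [pvGoB, pvDropClause]
  | l :: rest, acc => by
      by_cases hm : pvMarker l = true
      · constructor
        · simp only [List.foldl, pvStepA, hm, if_true, pvGoB]
          exact (pvFoldA_eq rest acc).2
        · simp only [List.foldl, pvStepA, hm, if_true, pvDropClause, Bool.true_or]
          exact (pvFoldA_eq rest acc).2
      · rw [Bool.not_eq_true] at hm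
        constructor
        · simp only [List.foldl, pvStepA, hm, pvGoB, Bool.false_eq_true, if_false]
          rw [(pvFoldA_eq rest (acc ++ [l])).1]
          simp
        · by_cases ht : pvTerm l = true
          · simp only [List.foldl, pvStepA, hm, ht, Bool.not_true, pvDropClause, Bool.false_or,
              Bool.false_eq_true, if_false]
            exact (pvFoldA_eq rest acc).1
          · simp only [List.foldl, pvStepA, hm, pvDropClause, Bool.false_or, Bool.false_eq_true, if_false]
            rw [Bool.not_eq_true] at ht
            simp only [ht, Bool.not_false, if_true]
            exact (pvFoldA_eq rest acc).2

-- ===== VERDICT (by name: the statement is the Claim_ definition above) =====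
theorem modify_kb_spec : Claim_equal_modify_kb := by
  intro kb _
  unfold Spec_modify_kb modify_kb modify_kb_alt
  rw [(pvFoldA_eq ((PySem.Str.split? kb "\n").getD []) []).1]
  simp
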